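-- pv_equiv track=rewrite | github.com/vicety/LeetCode | python/msft-2022/2.py | solution
-- ===== SOURCE A (Python) =====
-- def solution(S, X, Y):
--     # write your code in Python 3.6
--     dist = []
--     for i in range(len(X)):
--         dist += [(X[i] ** 2 + Y[i] ** 2, S[i])]
--     dist.sort()
--     vis = set()
--     cur_d = -1
--     cur_d_sz = 0
--     for i in range(len(X)):
--         d, tag = dist[i]
--         if d == cur_d:
--             cur_d_sz += 1
--         else:
--             cur_d = d
--             cur_d_sz = 1
--         if tag in vis:
--             return len(vis) - (cur_d_sz - 1)
--         vis.add(tag)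
--     return len(vis)
-- ===== SOURCE B (Python) =====
-- def solution(S, X, Y):
--     # Group tags by squared distance, then walk the groups in increasing
--     # distance order; stop at the first group that introduces a duplicate tag.
--     groups = {}
--     for tag, x, y in zip(S, X, Y):
--         groups.setdefault(x * x + y * y, []).append(tag)
--     vis = set()
--     for d in sorted(groups):
--         here = set()
--         for tag in groups[d]:
--             if tag in vis or tag in here:
--                 return len(vis)
--             here.add(tag)
--         vis |= here
--     return len(vis)
-- ===== Notes on version B (the rewrite author's own statement) =====
-- stated objective: alternative
-- what changed: A builds a list of (distance, tag) pairs, sorts it lexicographically and runs one scan with running cur_d/cur_d_sz counters to subtract the current group's partial size on a duplicate; B instead groups tags by squared distance in a dict, walks the distinct distances in sorted order with a per-group local set, and returns len(vis) (the distinct tags of the completed groups) as soon as any group introduces a duplicate.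
import Mathlib
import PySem

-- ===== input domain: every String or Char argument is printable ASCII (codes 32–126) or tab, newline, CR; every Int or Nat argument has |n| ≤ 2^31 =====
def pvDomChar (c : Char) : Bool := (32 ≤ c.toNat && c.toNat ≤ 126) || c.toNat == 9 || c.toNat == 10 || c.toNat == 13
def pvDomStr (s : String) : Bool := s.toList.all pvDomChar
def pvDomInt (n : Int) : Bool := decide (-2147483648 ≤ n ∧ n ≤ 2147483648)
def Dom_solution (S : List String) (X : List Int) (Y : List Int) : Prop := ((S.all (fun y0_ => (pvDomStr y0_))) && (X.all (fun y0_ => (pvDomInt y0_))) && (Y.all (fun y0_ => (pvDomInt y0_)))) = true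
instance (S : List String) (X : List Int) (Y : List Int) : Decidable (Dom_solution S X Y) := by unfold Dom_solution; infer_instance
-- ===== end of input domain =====

-- B groups tags by squared distance in a dict and walks the distinct distances in sorted
-- order with a per-group local set, instead of A's single counter-tracking scan of the
-- lexicographically sorted (distance, tag) list; objective: alternative decomposition.

-- ===== PORT A =====
-- the 'for i in range(len(X))' scan over dist with vis / cur_d / cur_d_sz and early return
def solAScan : List (Int × String) → PySem.Set String → Int → Int → Int
  | [], vis, _, _ => PySem.Set.len vis
  | (d, tag) :: rest, vis, curD, curSz =>
    let curSz' : Int := if d = curD then curSz + 1 else 1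
    if PySem.Set.contains vis tag then PySem.Set.len vis - (curSz' - 1)
    else solAScan rest (PySem.Set.add vis tag) d curSz'

def solution (S : List String) (X : List Int) (Y : List Int) : Int :=
  let dist : List (Int × String) :=
    (PySem.List.pyRange 0 (X.length : Int) 1).foldl
      (fun acc i => acc ++ [(PySem.List.pyGetD X i 0 ^ 2 + PySem.List.pyGetD Y i 0 ^ 2,
                             PySem.List.pyGetD S i "")]) []
  solAScan (PySem.List.sorted2 dist Prod.fst Prod.snd) PySem.Set.empty (-1) 0

-- ===== PORT B =====
-- the inner 'for tag in groups[d]' loop building the local set 'here'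
def solBHere (vis : PySem.Set String) : PySem.Set String → List String → Option (PySem.Set String)
  | here, [] => some here
  | here, t :: ts =>
    if PySem.Set.contains vis t || PySem.Set.contains here t then none
    else solBHere vis (PySem.Set.add here t) ts

-- the outer 'for d in sorted(groups)' loop
def solBLoop (g : PySem.Dict Int (List String)) : PySem.Set String → List Int → Int
  | vis, [] => PySem.Set.len vis
  | vis, d :: ds =>
    match solBHere vis PySem.Set.empty (g.getD d []) with
    | none => PySem.Set.len vis
    | some here => solBLoop g (PySem.Set.union vis here) ds

def solution_alt (S : List String) (X : List Int) (Y : List Int) : Int :=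
  let groups : PySem.Dict Int (List String) :=
    (S.zip (X.zip Y)).foldl
      (fun d p => d.modify (p.2.1 * p.2.1 + p.2.2 * p.2.2) [] (· ++ [p.1])) PySem.Dict.empty
  solBLoop groups PySem.Set.empty (PySem.List.sorted groups.keys (fun k => k))

-- ===== PRECONDITION & SPEC =====
-- A indexes S[i] and Y[i] for every i < len(X): it raises IndexError when S or Y is shorter than X.
def Pre_solution (S : List String) (X : List Int) (Y : List Int) : Prop :=
  X.length ≤ S.length ∧ X.length ≤ Y.length
instance (S : List String) (X : List Int) (Y : List Int) : Decidable (Pre_solution S X Y) := by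
  unfold Pre_solution; infer_instance

def pvWitness_solution : List String × List Int × List Int := (["a", "b"], [1, 2], [0, 3])

def Spec_solution (S : List String) (X : List Int) (Y : List Int) (out : Int) : Prop :=
  out = solution_alt S X Y
instance (S : List String) (X : List Int) (Y : List Int) (out : Int) : Decidable (Spec_solution S X Y out) := by
  unfold Spec_solution; infer_instance

-- ===== CLAIM (what is proved, stated in full; the proofs are below) =====
def Claim_equal_solution : Prop := ∀ (S : List String) (X : List Int) (Y : List Int),
  Dom_solution S X Y → Pre_solution S X Y → Spec_solution S X Y (solution S X Y)

-- ===== LEMMAS AND PROOFS =====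

-- squared distance of a zipped (tag, x, y) triple
def pvKeyOf (p : String × Int × Int) : Int := p.2.1 * p.2.1 + p.2.2 * p.2.2

-- Python's lexicographic '<' on the (distance, tag) tuples, as sorted2 uses it
def pvLexLt (a b : Int × String) : Bool :=
  decide (a.1 < b.1) || (!decide (b.1 < a.1) && decide (a.2 < b.2))

-- a group 'g' of tags is "bad" against the already-seen set: an internal duplicate or one already seen
def BadG (g : List String) (vis : List String) : Prop := ¬ g.Nodup ∨ ∃ t ∈ g, t ∈ vis

lemma pvLexLt_iff (a b : Int × String) :
    pvLexLt a b = true ↔ (a.1 < b.1 ∨ (¬ b.1 < a.1 ∧ a.2 < b.2)) := by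
  simp [pvLexLt]

lemma pvLexLt_asymm {a b : Int × String} (h : pvLexLt a b = true) : pvLexLt b a = false := by
  rw [pvLexLt_iff] at h
  rw [Bool.eq_false_iff, Ne, pvLexLt_iff]
  rcases h with h | ⟨h1, h2⟩
  · rintro (h' | ⟨h1', h2'⟩)
    · omega
    · omega
  · rintro (h' | ⟨h1', h2'⟩)
    · omega
    · exact absurd h2 (not_lt.2 h2'.le)

lemma pvLexLt_trans {a b c : Int × String} (h1 : pvLexLt a b = true) (h2 : pvLexLt b c = true) :
    pvLexLt a c = true := by
  rw [pvLexLt_iff] at h1 h2 ⊢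
  rcases h1 with h1 | ⟨h1, h1'⟩ <;> rcases h2 with h2 | ⟨h2, h2'⟩
  · left; omega
  · left; omega
  · left; omega
  · right; exact ⟨by omega, lt_trans h1' h2'⟩

lemma insertBy_pairwise_lex (x : Int × String) : ∀ (ys : List (Int × String)),
    ys.Pairwise (fun a b => pvLexLt b a = false) →
    (PySem.List.insertBy pvLexLt x ys).Pairwise (fun a b => pvLexLt b a = false) := by
  intro ys
  induction ys with
  | nil => intro _; simp [PySem.List.insertBy]
  | cons y ys ih =>
    intro h
    rw [List.pairwise_cons] at h
    obtain ⟨hy, hys⟩ := h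
    show (if pvLexLt x y = true then x :: y :: ys else y :: PySem.List.insertBy pvLexLt x ys).Pairwise _
    split_ifs with hxy
    · refine List.pairwise_cons.2 ⟨?_, List.pairwise_cons.2 ⟨hy, hys⟩⟩
      intro z hz
      rcases List.mem_cons.1 hz with rfl | hz
      · exact pvLexLt_asymm hxy
      · -- z ∈ ys; pvLexLt z y = false, pvLexLt x y = true ⊢ pvLexLt z x = false
        have hzy := hy z hz
        rw [Bool.eq_false_iff]
        intro hzx
        exact absurd (pvLexLt_trans hzx hxy) (Bool.eq_false_iff.1 hzy)
    · refine List.pairwise_cons.2 ⟨?_, ih hys⟩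
      intro z hz
      rw [PySem.List.mem_insertBy] at hz
      rcases hz with rfl | hz
      · exact Bool.eq_false_iff.2 hxy
      · exact hy z hz

lemma foldl_insertBy_pairwise_lex (xs : List (Int × String)) : ∀ (acc : List (Int × String)),
    acc.Pairwise (fun a b => pvLexLt b a = false) →
    (xs.foldl (fun acc x => PySem.List.insertBy pvLexLt x acc) acc).Pairwise
      (fun a b => pvLexLt b a = false) := by
  induction xs with
  | nil => intro acc h; exact h
  | cons x xs ih => intro acc h; exact ih _ (insertBy_pairwise_lex x acc h)

lemma sorted2_eq_foldl (l : List (Int × String)) :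
    PySem.List.sorted2 l Prod.fst Prod.snd false =
      l.foldl (fun acc x => PySem.List.insertBy pvLexLt x acc) [] := by
  rfl

lemma sorted2_pairwise_le (l : List (Int × String)) :
    (PySem.List.sorted2 l Prod.fst Prod.snd false).Pairwise (fun a b => a.1 ≤ b.1) := by
  rw [sorted2_eq_foldl]
  refine (foldl_insertBy_pairwise_lex l [] (by simp)).imp ?_
  intro a b h
  rw [Bool.eq_false_iff, Ne, pvLexLt] at h
  simp only [Bool.or_eq_true, Bool.and_eq_true, Bool.not_eq_true', decide_eq_true_iff,
    decide_eq_false_iff_not] at h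
  omega

lemma split_min (k : Int) : ∀ (l : List (Int × String)),
    l.Pairwise (fun a b => a.1 ≤ b.1) → (∀ p ∈ l, k ≤ p.1) →
    l = l.filter (fun p => decide (p.1 = k)) ++ l.filter (fun p => decide (p.1 ≠ k)) := by
  intro l
  induction l with
  | nil => intro _ _; simp
  | cons p t ih =>
    intro hp hk
    rw [List.pairwise_cons] at hp
    by_cases hpk : p.1 = k
    · simp only [List.filter_cons, hpk, decide_true, ne_eq, not_true_eq_false, decide_false]
      simpa using ih hp.2 (fun q hq => hk q (List.mem_cons_of_mem _ hq))
    · have hklt : k < p.1 := lt_of_le_of_ne (hk p (List.mem_cons_self)) (Ne.symm hpk)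
      have hall : ∀ q ∈ p :: t, q.1 ≠ k := by
        intro q hq
        rcases List.mem_cons.1 hq with rfl | hq
        · exact hpk
        · have := hp.1 q hq; omega
      have h1 : (p :: t).filter (fun p => decide (p.1 = k)) = [] := by
        rw [List.filter_eq_nil_iff]
        intro q hq
        simpa using hall q hq
      have h2 : (p :: t).filter (fun p => decide (p.1 ≠ k)) = p :: t := by
        rw [List.filter_eq_self]
        intro q hq
        simpa using hall q hq
      rw [h1, h2, List.nil_append]

lemma eq_map_const_fst (k : Int) : ∀ (l : List (Int × String)), (∀ p ∈ l, p.1 = k) →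
    l = (l.map Prod.snd).map (fun t => (k, t)) := by
  intro l
  induction l with
  | nil => intro _; rfl
  | cons p t ih =>
    intro h
    have hp := h p (List.mem_cons_self)
    simp only [List.map_cons]
    rw [← ih (fun q hq => h q (List.mem_cons_of_mem _ hq))]
    rw [← hp]

lemma scanA_inside (k : Int) : ∀ (g : List String) (vis : List String) (c : Int)
    (rest : List (Int × String)), vis.Nodup →
    (BadG g vis → solAScan ((g.map (fun t => (k, t))) ++ rest) vis k c = PySem.Set.len vis - c) ∧
    (¬ BadG g vis → solAScan ((g.map (fun t => (k, t))) ++ rest) vis k c =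
      solAScan rest (PySem.Set.update vis g) k (c + g.length)) := by
  intro g
  induction g with
  | nil =>
    intro vis c rest hv
    constructor
    · intro hb; exact absurd hb (by simp [BadG])
    · intro _; simp [PySem.Set.update_nil]
  | cons t g ih =>
    intro vis c rest hv
    by_cases htv : t ∈ vis
    · have hstep : solAScan (((t :: g).map (fun s => (k, s))) ++ rest) vis k c =
          PySem.Set.len vis - c := by
        simp only [List.map_cons, List.cons_append, solAScan,
          PySem.Set.contains_eq_listContains]
        rw [if_pos (by simpa using htv)]
        simp
      constructor
      · intro _; exact hstep
      · intro hnb; exact absurd (Or.inr ⟨t, List.mem_cons_self, htv⟩) hnb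
    · have hadd : PySem.Set.add vis t = vis ++ [t] := PySem.Set.add_of_not_mem htv
      have hv' : (vis ++ [t]).Nodup := by
        simp [List.nodup_append, hv]
        intro a ha rfl; exact htv ha
      have hstep : solAScan (((t :: g).map (fun s => (k, s))) ++ rest) vis k c =
          solAScan ((g.map (fun s => (k, s))) ++ rest) (vis ++ [t]) k (c + 1) := by
        simp only [List.map_cons, List.cons_append, solAScan,
          PySem.Set.contains_eq_listContains]
        rw [if_neg (by simpa using htv), hadd]
        simp
      have hbad_iff : BadG (t :: g) vis ↔ BadG g (vis ++ [t]) := by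
        simp only [BadG, List.nodup_cons, List.mem_append, List.mem_singleton]
        constructor
        · rintro (h | ⟨s, hs, hsv⟩)
          · rw [not_and_or] at h
            rcases h with h | h
            · push Not at h
              exact Or.inr ⟨t, h, Or.inr rfl⟩
            · exact Or.inl h
          · rcases List.mem_cons.1 hs with rfl | hs
            · exact absurd hsv htv
            · exact Or.inr ⟨s, hs, Or.inl hsv⟩
        · rintro (h | ⟨s, hs, hsv | rfl⟩)
          · exact Or.inl (by simp [h])
          · exact Or.inr ⟨s, List.mem_cons_of_mem _ hs, hsv⟩
          · exact Or.inl (by simp [hs])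
      obtain ⟨ihb, ihok⟩ := ih (vis ++ [t]) (c + 1) rest hv'
      constructor
      · intro hb
        rw [hstep, ihb (hbad_iff.1 hb)]
        simp [PySem.Set.len]
      · intro hnb
        rw [hstep, ihok (fun h => hnb (hbad_iff.2 h))]
        rw [PySem.Set.update_cons, PySem.Set.add_of_not_mem htv]
        congr 1
        simp
        ring

lemma scanA_enter (k curD : Int) (g : List String) (vis : List String) (c : Int)
    (rest : List (Int × String)) (hne : k ≠ curD) (hg : g ≠ []) (hv : vis.Nodup) :
    (BadG g vis → solAScan ((g.map (fun t => (k, t))) ++ rest) vis curD c = PySem.Set.len vis) ∧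
    (¬ BadG g vis → solAScan ((g.map (fun t => (k, t))) ++ rest) vis curD c =
      solAScan rest (PySem.Set.update vis g) k (g.length)) := by
  cases g with
  | nil => exact absurd rfl hg
  | cons t g =>
    by_cases htv : t ∈ vis
    · have hstep : solAScan (((t :: g).map (fun s => (k, s))) ++ rest) vis curD c =
          PySem.Set.len vis := by
        simp only [List.map_cons, List.cons_append, solAScan,
          PySem.Set.contains_eq_listContains]
        rw [if_neg hne, if_pos (by simpa using htv)]
        ring
      constructor
      · intro _; exact hstep
      · intro hnb; exact absurd (Or.inr ⟨t, List.mem_cons_self, htv⟩) hnb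
    · have hadd : PySem.Set.add vis t = vis ++ [t] := PySem.Set.add_of_not_mem htv
      have hv' : (vis ++ [t]).Nodup := by
        simp [List.nodup_append, hv]
        intro a ha rfl; exact htv ha
      have hstep : solAScan (((t :: g).map (fun s => (k, s))) ++ rest) vis curD c =
          solAScan ((g.map (fun s => (k, s))) ++ rest) (vis ++ [t]) k 1 := by
        simp only [List.map_cons, List.cons_append, solAScan,
          PySem.Set.contains_eq_listContains]
        rw [if_neg hne, if_neg (by simpa using htv), hadd]
      have hbad_iff : BadG (t :: g) vis ↔ BadG g (vis ++ [t]) := by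
        simp only [BadG, List.nodup_cons, List.mem_append, List.mem_singleton]
        constructor
        · rintro (h | ⟨s, hs, hsv⟩)
          · rw [not_and_or] at h
            rcases h with h | h
            · push Not at h
              exact Or.inr ⟨t, h, Or.inr rfl⟩
            · exact Or.inl h
          · rcases List.mem_cons.1 hs with rfl | hs
            · exact absurd hsv htv
            · exact Or.inr ⟨s, hs, Or.inl hsv⟩
        · rintro (h | ⟨s, hs, hsv | rfl⟩)
          · exact Or.inl (by simp [h])
          · exact Or.inr ⟨s, List.mem_cons_of_mem _ hs, hsv⟩
          · exact Or.inl (by simp [hs])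
      obtain ⟨ihb, ihok⟩ := scanA_inside k g (vis ++ [t]) 1 rest hv'
      constructor
      · intro hb
        rw [hstep, ihb (hbad_iff.1 hb)]
        simp [PySem.Set.len]
      · intro hnb
        rw [hstep, ihok (fun h => hnb (hbad_iff.2 h))]
        rw [PySem.Set.update_cons, PySem.Set.add_of_not_mem htv]
        congr 1
        simp
        ring

lemma solBHere_char (vis : List String) : ∀ (ts : List String) (here : List String),
    here.Nodup →
    ((¬ ts.Nodup ∨ ∃ t ∈ ts, t ∈ vis ∨ t ∈ here) → solBHere vis here ts = none) ∧
    (¬ (¬ ts.Nodup ∨ ∃ t ∈ ts, t ∈ vis ∨ t ∈ here) →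
      solBHere vis here ts = some (PySem.Set.update here ts)) := by
  intro ts
  induction ts with
  | nil =>
    intro here hh
    constructor
    · intro hb; exact absurd hb (by simp)
    · intro _; simp [solBHere, PySem.Set.update_nil]
  | cons t ts ih =>
    intro here hh
    by_cases hbad1 : t ∈ vis ∨ t ∈ here
    · have hstep : solBHere vis here (t :: ts) = none := by
        simp only [solBHere, PySem.Set.contains_eq_listContains]
        rw [if_pos (by simpa using hbad1)]
      constructor
      · intro _; exact hstep
      · intro hnb; exact absurd (Or.inr ⟨t, List.mem_cons_self, hbad1⟩) hnb
    · push Not at hbad1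
      obtain ⟨htv, hth⟩ := hbad1
      have hadd : PySem.Set.add here t = here ++ [t] := PySem.Set.add_of_not_mem hth
      have hh' : (here ++ [t]).Nodup := by
        simp [List.nodup_append, hh]
        intro a ha rfl; exact hth ha
      have hstep : solBHere vis here (t :: ts) = solBHere vis (here ++ [t]) ts := by
        simp only [solBHere, PySem.Set.contains_eq_listContains]
        rw [if_neg (by simp [htv, hth]), hadd]
      have hbad_iff : (¬ (t :: ts).Nodup ∨ ∃ s ∈ t :: ts, s ∈ vis ∨ s ∈ here) ↔
          (¬ ts.Nodup ∨ ∃ s ∈ ts, s ∈ vis ∨ s ∈ here ++ [t]) := by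
        simp only [List.nodup_cons, List.mem_append, List.mem_singleton]
        constructor
        · rintro (h | ⟨s, hs, hsv⟩)
          · rw [not_and_or] at h
            rcases h with h | h
            · push Not at h
              exact Or.inr ⟨t, h, Or.inr (Or.inr rfl)⟩
            · exact Or.inl h
          · rcases List.mem_cons.1 hs with rfl | hs
            · rcases hsv with h | h
              · exact absurd h htv
              · exact absurd h hth
            · rcases hsv with h | h
              · exact Or.inr ⟨s, hs, Or.inl h⟩
              · exact Or.inr ⟨s, hs, Or.inr (Or.inl h)⟩
        · rintro (h | ⟨s, hs, hsv | hsh | rfl⟩)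
          · exact Or.inl (by simp [h])
          · exact Or.inr ⟨s, List.mem_cons_of_mem _ hs, Or.inl hsv⟩
          · exact Or.inr ⟨s, List.mem_cons_of_mem _ hs, Or.inr hsh⟩
          · exact Or.inl (by simp [hs])
      obtain ⟨ihb, ihok⟩ := ih (here ++ [t]) hh'
      constructor
      · intro hb
        rw [hstep]
        exact ihb (hbad_iff.1 hb)
      · intro hnb
        rw [hstep, ihok (fun h => hnb (hbad_iff.2 h))]
        rw [PySem.Set.update_cons, PySem.Set.add_of_not_mem hth]

lemma main_equiv (g : PySem.Dict Int (List String)) :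
    ∀ (ks : List Int) (l : List (Int × String)) (visA visB : List String) (curD c : Int),
    l.Pairwise (fun a b => a.1 ≤ b.1) →
    ks.Pairwise (· < ·) →
    (∀ k, k ∈ ks ↔ k ∈ l.map Prod.fst) →
    (∀ k ∈ ks, ((l.filter (fun p => decide (p.1 = k))).map Prod.snd).Perm (g.getD k [])) →
    visA.Perm visB → visA.Nodup →
    (∀ k ∈ ks, curD < k) →
    solAScan l visA curD c = solBLoop g visB ks := by
  intro ks
  induction ks with
  | nil =>
    intro l visA visB curD c _ _ hkeys _ hperm _ _
    have hl : l = [] := by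
      cases l with
      | nil => rfl
      | cons p t =>
        exact absurd ((hkeys p.1).2 (by simp)) (List.not_mem_nil)
    subst hl
    simp [solAScan, solBLoop, PySem.Set.len, hperm.length_eq]
  | cons k ks ih =>
    intro l visA visB curD c hsort hks hkeys hgroups hperm hnodA hcur
    rw [List.pairwise_cons] at hks
    -- k is the minimum key of l
    have hmin : ∀ p ∈ l, k ≤ p.1 := by
      intro p hp
      have : p.1 ∈ k :: ks := (hkeys p.1).2 (List.mem_map_of_mem hp)
      rcases List.mem_cons.1 this with h | h
      · omega
      · exact (hks.1 _ h).le
    set g1 := l.filter (fun p => decide (p.1 = k)) with hg1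
    set r := l.filter (fun p => decide (p.1 ≠ k)) with hr
    have hsplit : l = g1 ++ r := split_min k l hsort hmin
    set tags := g1.map Prod.snd with htags
    have hconst : ∀ p ∈ g1, p.1 = k := by
      intro p hp
      have := List.of_mem_filter hp
      simpa using this
    have hg1eq : g1 = tags.map (fun t => (k, t)) := eq_map_const_fst k g1 hconst
    have hkmem : k ∈ l.map Prod.fst := (hkeys k).1 List.mem_cons_self
    have hg1ne : g1 ≠ [] := by
      intro h0
      obtain ⟨p, hp, hpk⟩ := List.mem_map.1 hkmem
      have : p ∈ g1 := List.mem_filter.2 ⟨hp, by simpa using hpk⟩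
      simp [h0] at this
    have htagsne : tags ≠ [] := by
      intro h0
      exact hg1ne (by simpa [h0] using hg1eq)
    set gBk := g.getD k [] with hgBk
    have hpermk : tags.Perm gBk := hgroups k List.mem_cons_self
    have hne : k ≠ curD := by have := hcur k List.mem_cons_self; omega
    -- Bad on the two sides is the same
    have hbad_iff : BadG tags visA ↔
        (¬ gBk.Nodup ∨ ∃ t ∈ gBk, t ∈ visB ∨ t ∈ ([] : List String)) := by
      simp only [BadG, List.not_mem_nil, or_false]
      constructor
      · rintro (h | ⟨t, ht, htv⟩)
        · exact Or.inl (fun hn => h (hpermk.symm.nodup hn))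
        · exact Or.inr ⟨t, hpermk.mem_iff.1 ht, hperm.mem_iff.1 htv⟩
      · rintro (h | ⟨t, ht, htv⟩)
        · exact Or.inl (fun hn => h (hpermk.nodup hn))
        · exact Or.inr ⟨t, hpermk.mem_iff.2 ht, hperm.mem_iff.2 htv⟩
    obtain ⟨hAbad, hAok⟩ := scanA_enter k curD tags visA c r hne htagsne hnodA
    obtain ⟨hBbad, hBok⟩ := solBHere_char visB gBk [] List.nodup_nil
    by_cases hb : BadG tags visA
    · -- a duplicate inside this group (or against vis): both return the running count
      rw [hsplit, hg1eq, hAbad hb]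
      have : solBHere visB PySem.Set.empty gBk = none := hBbad (hbad_iff.1 hb)
      simp only [solBLoop, PySem.Set.empty] at this ⊢
      rw [this]
      simp [PySem.Set.len, hperm.length_eq]
    · -- clean group: both continue with the group's tags added
      have hAstep := hAok hb
      have hnbB := (fun h => hb (hbad_iff.2 h))
      have hBstep : solBHere visB ([] : List String) gBk = some (PySem.Set.update [] gBk) :=
        hBok hnbB
      have htnodup : tags.Nodup := by
        by_contra h; exact hb (Or.inl h)
      have htdisj : ∀ t ∈ tags, t ∉ visA := by
        intro t ht htv; exact hb (Or.inr ⟨t, ht, htv⟩)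
      have hgBnodup : gBk.Nodup := hpermk.nodup htnodup
      have hgBdisj : ∀ t ∈ gBk, t ∉ visB := by
        intro t ht htv
        exact htdisj t (hpermk.mem_iff.2 ht) (hperm.mem_iff.2 htv)
      have hupdA : PySem.Set.update visA tags = visA ++ tags :=
        PySem.Set.update_eq_append_of_disjoint visA tags htnodup htdisj
      have hupdB : PySem.Set.union visB gBk = visB ++ gBk := by
        show PySem.Set.update visB gBk = visB ++ gBk
        exact PySem.Set.update_eq_append_of_disjoint visB gBk hgBnodup hgBdisj
      have hupd0 : PySem.Set.update ([] : List String) gBk = gBk := by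
        rw [PySem.Set.update_eq_append_of_disjoint [] gBk hgBnodup (by simp)]
        simp
      -- reduce both sides one step
      rw [hsplit, hg1eq, hAstep]
      have hBred : solBLoop g visB (k :: ks) = solBLoop g (PySem.Set.union visB gBk) ks := by
        simp only [solBLoop, PySem.Set.empty]
        rw [hBstep, hupd0]
      rw [hBred]
      -- apply the induction hypothesis on the remaining groups
      rw [hupdA, hupdB]
      apply ih
      · exact hsort.sublist List.filter_sublist
      · exact hks.2
      · intro k'
        constructor
        · intro hk'
          have hk'l : k' ∈ l.map Prod.fst := (hkeys k').1 (List.mem_cons_of_mem _ hk')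
          obtain ⟨p, hp, hpk⟩ := List.mem_map.1 hk'l
          have hkk' : k < k' := hks.1 _ hk'
          refine List.mem_map.2 ⟨p, List.mem_filter.2 ⟨hp, ?_⟩, hpk⟩
          simp only [decide_eq_true_iff]
          omega
        · intro hk'
          obtain ⟨p, hp, hpk⟩ := List.mem_map.1 hk'
          have hpl : p ∈ l := List.mem_of_mem_filter hp
          have hpne : p.1 ≠ k := by simpa using List.of_mem_filter hp
          have : k' ∈ k :: ks := (hkeys k').2 (List.mem_map.2 ⟨p, hpl, hpk⟩)
          rcases List.mem_cons.1 this with rfl | h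
          · exact absurd hpk hpne
          · exact h
      · intro k' hk'
        have hkk' : k < k' := hks.1 _ hk'
        have hfe : r.filter (fun p => decide (p.1 = k')) = l.filter (fun p => decide (p.1 = k')) := by
          rw [hr, List.filter_filter]
          apply List.filter_congr
          intro p _
          by_cases hp : p.1 = k'
          · simp [hp]; omega
          · simp [hp]
        rw [hfe]
        exact hgroups k' (List.mem_cons_of_mem _ hk')
      · exact hperm.append hpermk
      · rw [List.nodup_append]
        refine ⟨hnodA, htnodup, ?_⟩
        intro t htv s hs he
        exact htdisj s hs (he ▸ htv)
      · intro k' hk'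
        exact hks.1 _ hk'

lemma build_eq (S : List String) (X : List Int) (Y : List Int)
    (h1 : X.length ≤ S.length) (h2 : X.length ≤ Y.length) :
    ((PySem.List.pyRange 0 (X.length : Int) 1).foldl
      (fun acc i => acc ++ [(PySem.List.pyGetD X i 0 ^ 2 + PySem.List.pyGetD Y i 0 ^ 2,
                             PySem.List.pyGetD S i "")]) []) =
    (S.zip (X.zip Y)).map (fun p => (pvKeyOf p, p.1)) := by
  rw [PySem.List.foldl_append_singleton_eq_map]
  have hlen : (S.zip (X.zip Y)).length = X.length := by
    simp [List.length_zip]; omega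
  apply List.ext_getElem
  · simp [PySem.List.length_pyRange_one, hlen]
  · intro n hn1 hn2
    have hnX : n < X.length := by
      simpa [PySem.List.length_pyRange_one] using hn1
    simp only [List.nil_append, List.getElem_map, PySem.List.getElem_pyRange_one,
      List.getElem_zip]
    have h0 : (0 : Int) + (n : Int) = (n : Int) := by omega
    rw [h0]
    simp only [PySem.List.pyGetD_natCast]
    have hgS : S.getD n "" = S[n]'(by omega) := List.getD_eq_getElem S "" (by omega)
    have hgX : X.getD n 0 = X[n]'(by omega) := List.getD_eq_getElem X 0 (by omega)
    have hgY : Y.getD n 0 = Y[n]'(by omega) := List.getD_eq_getElem Y 0 (by omega)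
    rw [hgS, hgX, hgY]
    simp [pvKeyOf]
    ring

lemma keys_foldl_modify : ∀ (l : List (String × Int × Int)) (d : PySem.Dict Int (List String)),
    (l.foldl (fun d p => d.modify (pvKeyOf p) [] (· ++ [p.1])) d).keys =
      PySem.Set.update d.keys (l.map pvKeyOf) := by
  intro l
  induction l with
  | nil => intro d; simp [PySem.Set.update_nil]
  | cons p l ih =>
    intro d
    simp only [List.foldl_cons, List.map_cons, PySem.Set.update_cons]
    rw [ih]
    congr 1
    rw [PySem.Dict.keys_modify]
    by_cases h : pvKeyOf p ∈ d.keys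
    · rw [PySem.Dict.keys_insert_of_contains, PySem.Set.add_of_mem h]
      exact (PySem.Dict.contains_iff_mem_keys _ _).2 h
    · rw [PySem.Dict.keys_insert_of_not_contains, PySem.Set.add_of_not_mem h]
      rw [← Bool.not_eq_true]
      intro hc
      exact h ((PySem.Dict.contains_iff_mem_keys _ _).1 hc)

lemma getD_groups (l : List (String × Int × Int)) (k : Int) :
    (l.foldl (fun d p => d.modify (pvKeyOf p) [] (· ++ [p.1])) PySem.Dict.empty).getD k [] =
      ((l.map (fun p => (pvKeyOf p, p.1))).filter (fun q => decide (q.1 = k))).map Prod.snd := by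
  have h : (l.foldl (fun d p => d.modify (pvKeyOf p) [] (· ++ [p.1])) PySem.Dict.empty) =
      ((l.map (fun p => (pvKeyOf p, p.1))).foldl
        (fun d q => d.modify q.1 [] (· ++ [q.2])) PySem.Dict.empty) := by
    rw [List.foldl_map]
  rw [h, PySem.Dict.getD_foldl_modify_append]
  simp only [PySem.Dict.getD_empty, List.nil_append]
  rfl

-- ===== VERDICT (by name: the statement is the Claim_ definition above) =====
theorem solution_spec : Claim_equal_solution := by
  intro S X Y hdom hpre
  unfold Spec_solution
  obtain ⟨h1, h2⟩ := hpre
  simp only [solution, solution_alt]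
  rw [build_eq S X Y h1 h2]
  have hkeysEq :
      ((S.zip (X.zip Y)).foldl
        (fun d p => d.modify (p.2.1 * p.2.1 + p.2.2 * p.2.2) [] (· ++ [p.1]))
        PySem.Dict.empty).keys = PySem.Set.ofList ((S.zip (X.zip Y)).map pvKeyOf) := by
    have := keys_foldl_modify (S.zip (X.zip Y)) PySem.Dict.empty
    simp only [pvKeyOf] at this ⊢
    rw [this, PySem.Dict.keys_empty, PySem.Set.update_nil_left]
  have hpermL := PySem.List.sorted2_perm
    ((S.zip (X.zip Y)).map (fun p => (pvKeyOf p, p.1))) Prod.fst Prod.snd false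
  apply main_equiv
  · exact sorted2_pairwise_le _
  · rw [hkeysEq]
    exact PySem.List.sorted_ofList_pairwise_lt _
  · intro k
    rw [PySem.List.mem_sorted, hkeysEq, PySem.Set.mem_ofList]
    have hmapfst : (((S.zip (X.zip Y)).map (fun p => (pvKeyOf p, p.1))).map Prod.fst) =
        (S.zip (X.zip Y)).map pvKeyOf := by
      rw [List.map_map]; rfl
    rw [← hmapfst]
    exact ⟨fun h => ((hpermL.map Prod.fst).mem_iff).2 h,
           fun h => ((hpermL.map Prod.fst).mem_iff).1 h⟩
  · intro k _
    have hg := getD_groups (S.zip (X.zip Y)) k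
    simp only [pvKeyOf] at hg ⊢
    rw [hg]
    exact ((hpermL.filter _).map Prod.snd)
  · exact List.Perm.refl []
  · exact List.nodup_nil
  · intro k hk
    rw [PySem.List.mem_sorted, hkeysEq, PySem.Set.mem_ofList] at hk
    obtain ⟨p, _, rfl⟩ := List.mem_map.1 hk
    have := mul_self_nonneg p.2.1
    have := mul_self_nonneg p.2.2
    simp only [pvKeyOf]
    omega
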